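-- pv_equiv track=rewrite | github.com/saigiresh2278/daa | DAA LAB DAY 11/SPECIFIC ELEMENT.py | subsets_with_element
-- ===== SOURCE A (Python) =====
-- def subsets_with_element(E, x):
--     subsets = []
--     n = len(E)
--     for i in range(1 << n):
--         subset = [E[j] for j in range(n) if (i & (1 << j))]
--         if x in subset:
--             subsets.append(subset)
--     return subsets
-- ===== SOURCE B (Python) =====
-- def subsets_with_element(E, x):
--     subsets_all = [[]]
--     for e in E:
--         subsets_all = subsets_all + [r + [e] for r in subsets_all]
--     return [s for s in subsets_all if x in s]
-- ===== Notes on version B (the rewrite author's own statement) =====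
-- stated objective: idiomatic
-- what changed: Replaces per-bitmask enumeration (for each of the 2^n masks, rebuilding its subset by scanning all n bit positions) with iterative powerset doubling over the elements followed by a single membership filter; the bitmask-increasing order and ascending element order are preserved.
import Mathlib
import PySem

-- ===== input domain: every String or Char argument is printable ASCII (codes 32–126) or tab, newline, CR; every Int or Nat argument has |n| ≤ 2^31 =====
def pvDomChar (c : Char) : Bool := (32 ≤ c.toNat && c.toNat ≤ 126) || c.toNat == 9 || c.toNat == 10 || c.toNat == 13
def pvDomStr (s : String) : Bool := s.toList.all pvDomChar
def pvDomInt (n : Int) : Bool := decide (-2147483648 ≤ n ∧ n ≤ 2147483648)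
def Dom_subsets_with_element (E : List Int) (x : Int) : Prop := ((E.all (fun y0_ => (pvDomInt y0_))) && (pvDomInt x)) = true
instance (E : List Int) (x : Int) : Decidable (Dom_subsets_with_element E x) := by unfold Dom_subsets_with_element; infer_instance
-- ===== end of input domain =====

-- B replaces A's per-bitmask bit-testing enumeration of the powerset with iterative
-- powerset doubling followed by one membership filter (objective: idiomatic).

-- ===== PORT A =====
-- subset = [E[j] for j in range(n) if (i & (1 << j))]; 'i & (1 << j)' nonzero is Nat.testBit i j
def pvMaskSubset (E : List Int) (i : Nat) : List Int :=
  (List.range E.length).filterMap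
    (fun j => if i.testBit j then PySem.List.pyGet? E (j : Int) else none)

def subsets_with_element (E : List Int) (x : Int) : List (List Int) :=
  (List.range (2 ^ E.length)).foldl
    (fun subsets i =>
      let subset := pvMaskSubset E i
      if x ∈ subset then subsets ++ [subset] else subsets) []

-- ===== PORT B =====
def subsets_with_element_alt (E : List Int) (x : Int) : List (List Int) :=
  (E.foldl (fun acc e => acc ++ acc.map (fun r => r ++ [e])) [[]]).filter
    (fun s => decide (x ∈ s))

-- ===== PRECONDITION & SPEC =====
def Spec_subsets_with_element (E : List Int) (x : Int) (out : List (List Int)) : Prop := out = subsets_with_element_alt E x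
instance (E : List Int) (x : Int) (out : List (List Int)) : Decidable (Spec_subsets_with_element E x out) := by unfold Spec_subsets_with_element; infer_instance

-- ===== CLAIM (what is proved, stated in full; the proofs are below) =====
def Claim_equal_subsets_with_element : Prop := ∀ (E : List Int) (x : Int), Dom_subsets_with_element E x → Spec_subsets_with_element E x (subsets_with_element E x)

-- ===== LEMMAS AND PROOFS =====

-- A's loop (append when the filter holds) is filtering the mapped list.
theorem pv_foldl_filter (f : Nat → List Int) (x : Int) (l : List Nat) (acc : List (List Int)) :
    l.foldl (fun s i => if x ∈ f i then s ++ [f i] else s) acc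
      = acc ++ (l.map f).filter (fun s => decide (x ∈ s)) := by
  induction l generalizing acc with
  | nil => simp
  | cons i l ih =>
    simp only [List.foldl_cons, List.map_cons, List.filter_cons, ih]
    by_cases h : x ∈ f i <;> simp [h]

theorem pvMaskSubset_append_lo (E : List Int) (a : Int) (i : Nat) (hi : i < 2 ^ E.length) :
    pvMaskSubset (E ++ [a]) i = pvMaskSubset E i := by
  unfold pvMaskSubset
  simp only [List.length_append, List.length_cons, List.length_nil, List.range_succ,
    List.filterMap_append, PySem.List.pyGet?_natCast]
  have hb : i.testBit E.length = false := Nat.testBit_lt_two_pow hi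
  simp only [List.filterMap_cons, List.filterMap_nil, hb, if_neg Bool.false_ne_true,
    List.append_nil]
  apply List.filterMap_congr
  intro j hj
  rw [List.mem_range] at hj
  rw [List.getElem?_append_left hj]

theorem pvMaskSubset_append_hi (E : List Int) (a : Int) (i : Nat) (hi : i < 2 ^ E.length) :
    pvMaskSubset (E ++ [a]) (2 ^ E.length + i) = pvMaskSubset E i ++ [a] := by
  unfold pvMaskSubset
  simp only [List.length_append, List.length_cons, List.length_nil, List.range_succ,
    List.filterMap_append, PySem.List.pyGet?_natCast]
  have hbit : (2 ^ E.length + i).testBit E.length = true := by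
    rw [Nat.testBit_two_pow_add_eq, Nat.testBit_lt_two_pow hi]; rfl
  simp only [List.filterMap_cons, List.filterMap_nil, hbit]
  congr 1
  · apply List.filterMap_congr
    intro j hj
    rw [List.mem_range] at hj
    rw [Nat.testBit_two_pow_add_gt hj, List.getElem?_append_left hj]
  · simp

-- The bitmask enumeration of the powerset equals the iterative doubling.
theorem pv_powerset_eq (E : List Int) :
    (List.range (2 ^ E.length)).map (pvMaskSubset E)
      = E.foldl (fun acc e => acc ++ acc.map (fun r => r ++ [e])) [[]] := by
  induction E using List.reverseRecOn with
  | nil => simp [pvMaskSubset]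
  | append_singleton E a ih =>
    rw [List.foldl_append]
    simp only [List.foldl_cons, List.foldl_nil]
    rw [← ih]
    have hlen : (2 : Nat) ^ (E ++ [a]).length = 2 ^ E.length + 2 ^ E.length := by
      simp [List.length_append, pow_succ, Nat.mul_two]
    rw [hlen, List.range_add, List.map_append, List.map_map, List.map_map]
    congr 1
    · apply List.map_congr_left
      intro i hi
      exact pvMaskSubset_append_lo E a i (List.mem_range.mp hi)
    · apply List.map_congr_left
      intro i hi
      exact pvMaskSubset_append_hi E a i (List.mem_range.mp hi)

-- ===== VERDICT (by name: the statement is the Claim_ definition above) =====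
theorem subsets_with_element_spec : Claim_equal_subsets_with_element := by
  intro E x _
  unfold Spec_subsets_with_element subsets_with_element subsets_with_element_alt
  rw [pv_foldl_filter (pvMaskSubset E) x, List.nil_append, pv_powerset_eq]
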